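-- pv_equiv track=rewrite | github.com/JSYoo5B/TIL | BOJ/2447/2447.py | get_character
-- ===== SOURCE A (Python) =====
-- def get_character(x, y, N, memo):
--     # Use memo first
--     if memo[x][y] != None:
--         return memo[x][y]
--
--     N //= 3
--     if N == 1:
--         # On lowest level, follow default pattern
--         if x % 3 == 1 and y % 3 == 1:
--             memo[x][y] = ' '
--             return ' '
--         else:
--             memo[x][y] = '*'
--             return '*'
--     elif x//N == 1 and y//N == 1:
--         # Center of current levels are blank
--         memo[x][y] = ' '
--         return ' '
--     else:
--         # When current grid isn't center, reduce
--         memo[x][y] = get_character(x%N, y%N, N, memo)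
--         return memo[x][y]
-- ===== SOURCE B (Python) =====
-- def get_character(x, y, N, memo):
--     # Iterative re-implementation: precompute the descent chain of coordinates,
--     # then resolve it with a single scan of the memo.  Performs the same memo
--     # writes as the recursive original.
--     chain = [(x, y)]
--     n = N // 3
--     while n > 1 and not (x // n == 1 and y // n == 1):
--         x, y = x % n, y % n
--         chain.append((x, y))
--         n //= 3
--     if n == 1:
--         ch = ' ' if x % 3 == 1 and y % 3 == 1 else '*'
--     else:
--         ch = ' '
--     for i, (cx, cy) in enumerate(chain):
--         if memo[cx][cy] is not None:
--             ch = memo[cx][cy]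
--             chain = chain[:i]
--             break
--     for cx, cy in chain:
--         memo[cx][cy] = ch
--     return ch
-- ===== Notes on version B (the rewrite author's own statement) =====
-- stated objective: alternative
-- what changed: A's recursion is replaced by an iterative descent that first precomputes the whole chain of visited coordinates (no recursion, no per-level early return) and then resolves it with a single scan for the first cached entry, filling the memo in one batch afterwards.
-- outside the precondition, e.g. on get_character(-3, 1, -3, [['', None], [], ['']]): A returns '', B returns ' '
import Mathlib
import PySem

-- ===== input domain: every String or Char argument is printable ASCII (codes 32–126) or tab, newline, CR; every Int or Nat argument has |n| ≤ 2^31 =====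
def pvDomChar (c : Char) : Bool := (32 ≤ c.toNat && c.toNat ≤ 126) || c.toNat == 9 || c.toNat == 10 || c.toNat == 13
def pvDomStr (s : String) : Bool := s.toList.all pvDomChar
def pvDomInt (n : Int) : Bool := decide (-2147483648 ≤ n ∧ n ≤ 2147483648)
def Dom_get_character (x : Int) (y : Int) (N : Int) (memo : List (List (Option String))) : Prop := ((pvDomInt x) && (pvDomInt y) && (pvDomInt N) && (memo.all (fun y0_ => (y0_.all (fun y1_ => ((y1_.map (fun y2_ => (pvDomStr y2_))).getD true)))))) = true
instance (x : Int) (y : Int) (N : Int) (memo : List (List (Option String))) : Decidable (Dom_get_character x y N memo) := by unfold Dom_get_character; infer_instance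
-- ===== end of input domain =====

-- B replaces A's recursion by an iterative descent that precomputes the chain of visited
-- coordinates and then resolves it with a single memo scan (alternative decomposition, not
-- claimed faster).  Both Pythons mutate `memo` identically on Pre_; the Lean ports and the
-- equivalence proved here are about the RETURN value only (memo writes are not modeled).

-- memo[x][y] under Python indexing (negative wrap; none = IndexError)
def pvLook (memo : List (List (Option String))) (x y : Int) : Option (Option String) :=
  (PySem.List.pyGet? memo x).bind (fun row => PySem.List.pyGet? row y)

-- termination facts cited by the ports' decreasing_by (kept above the ports for that reason)
lemma pvDiv3_lt (N : Int) (h2 : ¬ PySem.Int.floordiv N 3 ≤ 0) :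
    (PySem.Int.floordiv N 3).toNat < N.toNat := by
  simp only [PySem.Int.floordiv_eq_ediv_of_pos (by norm_num : (0:Int) < 3)] at *
  omega

lemma pvDiv3_lt' (n : Int) (h : 1 < n) :
    (PySem.Int.floordiv n 3).toNat < n.toNat := by
  simp only [PySem.Int.floordiv_eq_ediv_of_pos (by norm_num : (0:Int) < 3)]
  omega

-- ===== PORT A =====
def get_character (x : Int) (y : Int) (N : Int) (memo : List (List (Option String))) : String :=
  match pvLook memo x y with
  | none => ""          -- memo[x][y] raises IndexError: outside Pre_
  | some (some s) => s  -- cache hit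
  | some none =>
    -- Python rebinds N to N // 3 here; the port writes the rebound value out each time
    if PySem.Int.floordiv N 3 = 1 then
      if PySem.Int.mod x 3 = 1 ∧ PySem.Int.mod y 3 = 1 then " " else "*"
    else if PySem.Int.floordiv N 3 ≤ 0 then ""  -- Python raises (ZeroDivisionError/RecursionError): outside Pre_
    else if PySem.Int.floordiv x (PySem.Int.floordiv N 3) = 1 ∧
            PySem.Int.floordiv y (PySem.Int.floordiv N 3) = 1 then " "
    else get_character (PySem.Int.mod x (PySem.Int.floordiv N 3))
           (PySem.Int.mod y (PySem.Int.floordiv N 3)) (PySem.Int.floordiv N 3) memo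
termination_by N.toNat
decreasing_by
  rename_i hle _
  exact pvDiv3_lt N hle

-- ===== PORT B =====
-- the while-loop of Source B: extends the chain, returns (chain, final x, final y, final n)
def pvDescend (x y n : Int) (acc : List (Int × Int)) :
    List (Int × Int) × Int × Int × Int :=
  if 1 < n ∧ ¬(PySem.Int.floordiv x n = 1 ∧ PySem.Int.floordiv y n = 1) then
    pvDescend (PySem.Int.mod x n) (PySem.Int.mod y n) (PySem.Int.floordiv n 3)
      (acc ++ [(PySem.Int.mod x n, PySem.Int.mod y n)])
  else (acc, x, y, n)
termination_by n.toNat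
decreasing_by
  rename_i h
  exact pvDiv3_lt' n h.1

-- the resolving scan of Source B: first cached entry along the chain wins (a missing cell
-- would be an IndexError in Python and lies outside Pre_)
def pvFirstHit (memo : List (List (Option String))) : List (Int × Int) → Option String
  | [] => none
  | (cx, cy) :: rest =>
    match pvLook memo cx cy with
    | some (some s) => some s
    | _ => pvFirstHit memo rest

-- the tail of Source B: resolve the chain (cache hit, else base pattern / centre blank)
def pvResolve (memo : List (List (Option String)))
    (r : List (Int × Int) × Int × Int × Int) : String :=
  match pvFirstHit memo r.1 with
  | some s => s
  | none =>
    if r.2.2.2 = 1 then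
      if PySem.Int.mod r.2.1 3 = 1 ∧ PySem.Int.mod r.2.2.1 3 = 1 then " " else "*"
    else " "

def get_character_alt (x : Int) (y : Int) (N : Int) (memo : List (List (Option String))) : String :=
  pvResolve memo (pvDescend x y (PySem.Int.floordiv N 3) [(x, y)])

-- ===== PRECONDITION & SPEC =====
-- N is a power of 3 with N ≥ 3 (the sizes the fractal is defined for); a plain
-- repeated-division check on the input, unbounded
def pvIsPow3Go : Nat → Int → Bool
  | 0, n => n == 3
  | f + 1, n => if 3 < n then (if n % 3 = 0 then pvIsPow3Go f (n / 3) else false) else n == 3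

def pvIsPow3 (n : Int) : Bool := pvIsPow3Go n.toNat n

-- Pre_ excludes inputs where A raises (IndexError on a missing cell; ZeroDivisionError or
-- RecursionError when the descent exhausts a non-power-of-3 N) and, with them, the inputs
-- where a non-power-of-3 N happens to return early (a lucky centre test or cache hit before
-- the crash level); admitted are all immediate cache hits and all proper fractal calls:
-- N any power of 3 (or 4, 5, which behave exactly as the base level 3) with the descent
-- square of the memo present.
def Pre_get_character (x : Int) (y : Int) (N : Int) (memo : List (List (Option String))) : Prop :=
  ((pvLook memo x y).getD none ≠ none)  -- immediate cache hit
  ∨ ((N = 4 ∨ N = 5 ∨ pvIsPow3 N = true)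
     ∧ pvLook memo x y ≠ none
     ∧ (PySem.Int.floordiv N 3).toNat ≤ memo.length
     ∧ ∀ row ∈ memo.take (PySem.Int.floordiv N 3).toNat,
         (PySem.Int.floordiv N 3).toNat ≤ row.length)

instance (x : Int) (y : Int) (N : Int) (memo : List (List (Option String))) : Decidable (Pre_get_character x y N memo) := by unfold Pre_get_character; infer_instance

def pvWitness_get_character : Int × Int × Int × List (List (Option String)) := (0, 0, 3, [[none]])

def Spec_get_character (x : Int) (y : Int) (N : Int) (memo : List (List (Option String))) (out : String) : Prop := out = get_character_alt x y N memo
instance (x : Int) (y : Int) (N : Int) (memo : List (List (Option String))) (out : String) : Decidable (Spec_get_character x y N memo out) := by unfold Spec_get_character; infer_instance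

-- ===== CLAIM (what is proved, stated in full; the proofs are below) =====
def Claim_equal_get_character : Prop := ∀ (x : Int) (y : Int) (N : Int) (memo : List (List (Option String))), Dom_get_character x y N memo → Pre_get_character x y N memo → Spec_get_character x y N memo (get_character x y N memo)

-- ===== LEMMAS AND PROOFS =====

-- a positive pvIsPow3 check really is a power of 3 (≥ 3)
lemma pvIsPow3Go_spec (f : Nat) : ∀ n : Int, n ≤ (f : Int) + 3 → pvIsPow3Go f n = true →
    ∃ k : Nat, n = 3 ^ (k + 1) := by
  induction f with
  | zero =>
    intro n _ h
    simp [pvIsPow3Go] at h; exact ⟨0, by omega⟩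
  | succ f IH =>
    intro n hb h
    rw [pvIsPow3Go] at h
    split_ifs at h with h1 h2
    · obtain ⟨k, hk⟩ := IH (n/3) (by omega) h
      refine ⟨k + 1, ?_⟩
      rw [pow_succ', ← hk]; omega
    · simp at h; exact ⟨0, by omega⟩

lemma pvIsPow3_spec (n : Int) (h : pvIsPow3 n = true) : ∃ k : Nat, n = 3 ^ (k + 1) :=
  pvIsPow3Go_spec n.toNat n (by omega) h

lemma pvDescend_eq (x y n : Int) (acc : List (Int × Int)) :
    pvDescend x y n acc =
      if 1 < n ∧ ¬(PySem.Int.floordiv x n = 1 ∧ PySem.Int.floordiv y n = 1) then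
        pvDescend (PySem.Int.mod x n) (PySem.Int.mod y n) (PySem.Int.floordiv n 3)
          (acc ++ [(PySem.Int.mod x n, PySem.Int.mod y n)])
      else (acc, x, y, n) := by
  rw [pvDescend]

lemma get_character_eq (x y N : Int) (memo : List (List (Option String))) :
    get_character x y N memo =
      match pvLook memo x y with
      | none => ""
      | some (some s) => s
      | some none =>
        if PySem.Int.floordiv N 3 = 1 then
          if PySem.Int.mod x 3 = 1 ∧ PySem.Int.mod y 3 = 1 then " " else "*"
        else if PySem.Int.floordiv N 3 ≤ 0 then ""
        else if PySem.Int.floordiv x (PySem.Int.floordiv N 3) = 1 ∧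
                PySem.Int.floordiv y (PySem.Int.floordiv N 3) = 1 then " "
        else get_character (PySem.Int.mod x (PySem.Int.floordiv N 3))
               (PySem.Int.mod y (PySem.Int.floordiv N 3)) (PySem.Int.floordiv N 3) memo := by
  rw [get_character]

-- the accumulator of pvDescend is purely prepended
lemma pvDescend_acc (m : ℕ) : ∀ (n x y : Int) (acc : List (Int × Int)), n.toNat = m →
    pvDescend x y n acc = (acc ++ (pvDescend x y n []).1, (pvDescend x y n []).2) := by
  induction m using Nat.strong_induction_on with
  | _ m IH =>
    intro n x y acc hm
    rw [pvDescend_eq x y n acc, pvDescend_eq x y n []]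
    split_ifs with h
    · have hlt : (PySem.Int.floordiv n 3).toNat < m := by
        have := h.1
        simp only [PySem.Int.floordiv_eq_ediv_of_pos (by norm_num : (0:Int) < 3)]
        omega
      rw [IH _ hlt _ _ _ _ rfl,
          IH _ hlt _ _ _ ([] ++ [(PySem.Int.mod x n, PySem.Int.mod y n)]) rfl]
      simp
    · simp

lemma pvDescend_acc' (n x y : Int) (acc : List (Int × Int)) :
    pvDescend x y n acc = (acc ++ (pvDescend x y n []).1, (pvDescend x y n []).2) :=
  pvDescend_acc n.toNat n x y acc rfl

-- on a cache hit both programs return the cached string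
lemma hit_both (x y N : Int) (memo : List (List (Option String))) (s : String)
    (h : pvLook memo x y = some (some s)) :
    get_character x y N memo = s ∧ get_character_alt x y N memo = s := by
  constructor
  · rw [get_character_eq, h]
  · rw [get_character_alt, pvDescend_acc', pvResolve]
    simp only [List.singleton_append, pvFirstHit, h]

-- base level: N // 3 == 1 (N = 3, 4 or 5)
lemma base_both (x y N : Int) (memo : List (List (Option String)))
    (hN : PySem.Int.floordiv N 3 = 1) (hc : pvLook memo x y ≠ none) :
    get_character x y N memo = get_character_alt x y N memo := by
  rcases ho : pvLook memo x y with _ | (_ | s)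
  · exact absurd ho hc
  · -- miss: both take the base pattern
    have hA : get_character x y N memo =
        if PySem.Int.mod x 3 = 1 ∧ PySem.Int.mod y 3 = 1 then " " else "*" := by
      rw [get_character_eq]
      simp only [ho]
      rw [if_pos hN]
    have hB : get_character_alt x y N memo =
        if PySem.Int.mod x 3 = 1 ∧ PySem.Int.mod y 3 = 1 then " " else "*" := by
      rw [get_character_alt, hN, pvDescend_eq,
          if_neg (fun h => absurd h.1 (by norm_num)), pvResolve]
      simp [pvFirstHit, ho]
    rw [hA, hB]
  · exact ((hit_both x y N memo s ho).1).trans ((hit_both x y N memo s ho).2).symm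

-- one reduction step of B
lemma alt_step (x y N : Int) (memo : List (List (Option String)))
    (ho : pvLook memo x y = some none)
    (hn : 1 < PySem.Int.floordiv N 3)
    (hcen : ¬(PySem.Int.floordiv x (PySem.Int.floordiv N 3) = 1 ∧
              PySem.Int.floordiv y (PySem.Int.floordiv N 3) = 1)) :
    get_character_alt x y N memo =
      get_character_alt (PySem.Int.mod x (PySem.Int.floordiv N 3))
        (PySem.Int.mod y (PySem.Int.floordiv N 3)) (PySem.Int.floordiv N 3) memo := by
  rw [get_character_alt, get_character_alt,
      pvDescend_eq x y _ [(x, y)], if_pos ⟨hn, hcen⟩,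
      pvDescend_acc', pvDescend_acc' _ _ _ [(_, _)]]
  rw [pvResolve, pvResolve]
  simp only [List.cons_append, List.nil_append, pvFirstHit, ho]

-- rows present up to m give every cell of the m × m square
lemma rows_cells (memo : List (List (Option String))) (m : ℕ)
    (hlen : m ≤ memo.length) (hrows : ∀ row ∈ memo.take m, m ≤ row.length) :
    ∀ i j : Int, 0 ≤ i → i < (m : Int) → 0 ≤ j → j < (m : Int) →
      pvLook memo i j ≠ none := by
  intro i j hi0 him hj0 hjm
  have hi : i.toNat < memo.length := by omega
  have hmem : memo[i.toNat] ∈ memo.take m := by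
    have : (memo.take m)[i.toNat]'(by simp; omega) = memo[i.toNat] := List.getElem_take
    exact this ▸ List.getElem_mem _
  have hrl : m ≤ memo[i.toNat].length := hrows _ hmem
  unfold pvLook
  rw [PySem.List.pyGet?_of_nonneg memo hi0, List.getElem?_eq_getElem hi]
  simp only [Option.bind_some]
  rw [PySem.List.pyGet?_of_nonneg _ hj0, List.getElem?_eq_getElem (show j.toNat < _ by omega)]
  simp

-- main induction: proper fractal sizes N = 3^(k+1)
lemma main_pow (k : ℕ) : ∀ (x y : Int) (memo : List (List (Option String))),
    pvLook memo x y ≠ none →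
    (∀ i j : Int, 0 ≤ i → i < 3 ^ k → 0 ≤ j → j < 3 ^ k → pvLook memo i j ≠ none) →
    get_character x y (3 ^ (k + 1)) memo = get_character_alt x y (3 ^ (k + 1)) memo := by
  induction k with
  | zero =>
    intro x y memo hc _
    have h31 : ((3:Int) ^ (0 + 1)) = 3 := by norm_num
    rw [h31]
    exact base_both x y 3 memo (by decide) hc
  | succ k IH =>
    intro x y memo hc hrows
    have hpow : PySem.Int.floordiv ((3:Int) ^ (k + 2)) 3 = 3 ^ (k + 1) := by
      rw [PySem.Int.floordiv_eq_ediv_of_pos (by norm_num : (0:Int) < 3), pow_succ']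
      exact Int.mul_ediv_cancel_left _ (by norm_num)
    have h3 : (3:Int) ≤ 3 ^ (k + 1) := by
      calc (3:Int) = 3 ^ 1 := by norm_num
        _ ≤ 3 ^ (k + 1) := pow_le_pow_right₀ (by norm_num) (by omega)
    rcases ho : pvLook memo x y with _ | (_ | s)
    · exact absurd ho hc
    · by_cases hcen : PySem.Int.floordiv x ((3:Int) ^ (k + 1)) = 1 ∧
                      PySem.Int.floordiv y ((3:Int) ^ (k + 1)) = 1
      · -- centre: both blank
        have hA : get_character x y (3 ^ (k + 1 + 1)) memo = " " := by
          rw [get_character_eq]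
          simp only [ho, hpow]
          rw [if_neg (show ¬ ((3:Int) ^ (k + 1) = 1) by omega),
              if_neg (show ¬ ((3:Int) ^ (k + 1) ≤ 0) by omega), if_pos hcen]
        have hB : get_character_alt x y (3 ^ (k + 1 + 1)) memo = " " := by
          rw [get_character_alt, hpow, pvDescend_eq, if_neg (fun h => h.2 hcen), pvResolve]
          simp only [pvFirstHit, ho]
          rw [if_neg (show ¬ ((3:Int) ^ (k + 1) = 1) by omega)]
        rw [hA, hB]
      · -- reduce
        have hx0 : 0 ≤ PySem.Int.mod x ((3:Int) ^ (k + 1)) :=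
          PySem.Int.mod_nonneg x (by omega)
        have hxlt : PySem.Int.mod x ((3:Int) ^ (k + 1)) < 3 ^ (k + 1) :=
          PySem.Int.mod_lt x (by omega)
        have hy0 : 0 ≤ PySem.Int.mod y ((3:Int) ^ (k + 1)) :=
          PySem.Int.mod_nonneg y (by omega)
        have hylt : PySem.Int.mod y ((3:Int) ^ (k + 1)) < 3 ^ (k + 1) :=
          PySem.Int.mod_lt y (by omega)
        have hstepA : get_character x y (3 ^ (k + 1 + 1)) memo =
            get_character (PySem.Int.mod x ((3:Int) ^ (k + 1)))
              (PySem.Int.mod y ((3:Int) ^ (k + 1))) ((3:Int) ^ (k + 1)) memo := by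
          rw [get_character_eq]
          simp only [ho, hpow]
          rw [if_neg (show ¬ ((3:Int) ^ (k + 1) = 1) by omega),
              if_neg (show ¬ ((3:Int) ^ (k + 1) ≤ 0) by omega), if_neg hcen]
        have hstepB : get_character_alt x y (3 ^ (k + 1 + 1)) memo =
            get_character_alt (PySem.Int.mod x ((3:Int) ^ (k + 1)))
              (PySem.Int.mod y ((3:Int) ^ (k + 1))) ((3:Int) ^ (k + 1)) memo := by
          have h := alt_step x y (3 ^ (k + 1 + 1)) memo ho (by rw [hpow]; omega)
            (by rw [hpow]; exact hcen)
          rwa [hpow] at h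
        rw [hstepA, hstepB]
        exact IH _ _ memo
          (hrows _ _ hx0 hxlt hy0 hylt)
          (fun i j h1 h2 h3' h4 => hrows i j h1 (by omega) h3' (by omega))
    · exact ((hit_both x y (3 ^ (k + 1 + 1)) memo s ho).1).trans
        ((hit_both x y (3 ^ (k + 1 + 1)) memo s ho).2).symm

-- ===== VERDICT (by name: the statement is the Claim_ definition above) =====
theorem get_character_spec : Claim_equal_get_character := by
  intro x y N memo _ hpre
  unfold Spec_get_character
  rcases hpre with h | ⟨hN, hc, hlen, hrows⟩
  · rcases ho : pvLook memo x y with _ | (_ | s)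
    · rw [ho] at h; simp at h
    · rw [ho] at h; simp at h
    · exact ((hit_both x y N memo s ho).1).trans ((hit_both x y N memo s ho).2).symm
  · rcases hN with rfl | rfl | hN3
    · exact base_both x y 4 memo (by decide) hc
    · exact base_both x y 5 memo (by decide) hc
    · obtain ⟨k', rfl⟩ := pvIsPow3_spec N hN3
      have hpow : PySem.Int.floordiv ((3:Int) ^ (k' + 1)) 3 = 3 ^ k' := by
        rw [PySem.Int.floordiv_eq_ediv_of_pos (by norm_num : (0:Int) < 3), pow_succ']
        exact Int.mul_ediv_cancel_left _ (by norm_num)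
      have hcast : (((PySem.Int.floordiv ((3:Int) ^ (k' + 1)) 3).toNat : ℕ) : Int) = 3 ^ k' := by
        rw [hpow, Int.toNat_of_nonneg (pow_nonneg (by norm_num : (0:Int) ≤ 3) k')]
      exact main_pow k' x y memo hc
        (fun i j h1 h2 h3 h4 => rows_cells memo _ hlen hrows i j h1 (by rw [hcast]; exact h2)
          h3 (by rw [hcast]; exact h4))
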